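-- pv_equiv track=rewrite | github.com/alex-petrov-vt/advent-of-code-2021 | day10.py | calculate_incomplete_syntax_scores
-- ===== SOURCE A (Python) =====
-- OPEN_CHAR = ["(", "[", "{", "<"]
--
-- VALID_PAIRS = {"(": ")", "[": "]", "{": "}", "<": ">"}
--
-- INCOMPLETE_CHAR_SCORES = {")": 1, "]": 2, "}": 3, ">": 4}
--
-- def is_incomplete(line):
--     stack = []
--     for curr_char in line:
--         if curr_char in OPEN_CHAR:
--             stack.append(curr_char)
--         else:
--             if len(stack) == 0:
--                 return False
--             open_char = stack.pop()
--             if not is_valid_pair(open_char, curr_char):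
--                 return False
--     return len(stack) > 0
--
-- def is_valid_pair(open_char, close_char):
--     return close_char == VALID_PAIRS[open_char]
--
-- def get_characters_to_complete(line):
--     result = []
--     stack = []
--     for curr_char in line:
--         if curr_char in OPEN_CHAR:
--             stack.append(curr_char)
--         else:
--             open_char = stack.pop()
--
--     assert len(stack) > 0
--     for _ in range(len(stack)):
--         char = stack.pop()
--         result.append(VALID_PAIRS[char])
--     return "".join(result)
--
-- def calculate_incomplete_syntax_scores(lines):
--     result = []
--     for line in lines:
--         if is_incomplete(line):
--             chars_to_complete = get_characters_to_complete(line)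
--             assert len(chars_to_complete) > 0
--             line_result = 0
--             for char in chars_to_complete:
--                 line_result = (line_result * 5) + INCOMPLETE_CHAR_SCORES[char]
--             result.append(line_result)
--     return result
-- ===== SOURCE B (Python) =====
-- VALID_PAIRS = {"(": ")", "[": "]", "{": "}", "<": ">"}
--
-- INCOMPLETE_CHAR_SCORES = {")": 1, "]": 2, "}": 3, ">": 4}
--
-- def calculate_incomplete_syntax_scores(lines):
--     result = []
--     for line in lines:
--         stack = []
--         corrupted = False
--         for c in line:
--             if c in VALID_PAIRS:
--                 stack.append(c)
--             elif not stack or VALID_PAIRS[stack.pop()] != c: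
--                 corrupted = True
--                 break
--         if not corrupted and stack:
--             score = 0
--             while stack:
--                 score = score * 5 + INCOMPLETE_CHAR_SCORES[VALID_PAIRS[stack.pop()]]
--             result.append(score)
--     return result
-- ===== Notes on version B (the rewrite author's own statement) =====
-- stated objective: simpler
-- what changed: One pass per line with a single stack that both detects corruption and yields the completion score inline, replacing A's three separate full scans per incomplete line (validate, rebuild stack, score).
import Mathlib
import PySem

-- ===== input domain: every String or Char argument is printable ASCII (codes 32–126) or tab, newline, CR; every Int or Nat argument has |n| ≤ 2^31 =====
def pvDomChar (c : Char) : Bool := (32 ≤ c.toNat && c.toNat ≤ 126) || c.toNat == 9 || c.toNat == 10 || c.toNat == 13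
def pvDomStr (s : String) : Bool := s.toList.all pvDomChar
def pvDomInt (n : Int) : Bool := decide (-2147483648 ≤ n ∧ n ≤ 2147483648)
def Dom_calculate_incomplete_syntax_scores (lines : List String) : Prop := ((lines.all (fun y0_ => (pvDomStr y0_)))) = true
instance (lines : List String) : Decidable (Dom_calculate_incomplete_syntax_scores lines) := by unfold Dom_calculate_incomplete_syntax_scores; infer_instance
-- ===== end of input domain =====

-- B does one pass per line with a single stack, scoring inline; A scans each incomplete line three times.

-- ===== PORT A =====
-- OPEN_CHAR
def pvOpenCharA : List Char := ['(', '[', '{', '<']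
-- VALID_PAIRS[c]; the final branch corresponds to Python's KeyError and is never reached (stacks hold openers only)
def pvPairClose (c : Char) : Char :=
  if c = '(' then ')' else if c = '[' then ']' else if c = '{' then '}' else if c = '<' then '>' else ' '
-- INCOMPLETE_CHAR_SCORES[c]; final branch = unreachable KeyError
def pvCharScore (c : Char) : Int :=
  if c = ')' then 1 else if c = ']' then 2 else if c = '}' then 3 else if c = '>' then 4 else 0
-- is_incomplete's loop (stack head = top)
def pvIsIncompleteAux : List Char → List Char → Bool
  | [], stack => decide (stack.length > 0)
  | c :: rest, stack =>
    if pvOpenCharA.contains c then pvIsIncompleteAux rest (c :: stack)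
    else match stack with
      | [] => false
      | o :: s => if c = pvPairClose o then pvIsIncompleteAux rest s else false
-- get_characters_to_complete's first loop; `stack.tail` is Python's stack.pop(), whose
-- empty-stack IndexError is unreachable at A's only call site (the line is incomplete)
def pvBuildStack : List Char → List Char → List Char
  | [], stack => stack
  | c :: rest, stack =>
    if pvOpenCharA.contains c then pvBuildStack rest (c :: stack)
    else pvBuildStack rest stack.tail
-- get_characters_to_complete's second loop (pop top-first = map over the head-is-top list)
def pvCharsToComplete (line : List Char) : List Char :=
  (pvBuildStack line []).map pvPairClose
def calculate_incomplete_syntax_scores (lines : List String) : List Int :=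
  lines.foldl (fun result line =>
    if pvIsIncompleteAux line.toList [] then
      result ++ [(pvCharsToComplete line.toList).foldl (fun r ch => r * 5 + pvCharScore ch) 0]
    else result) []

-- ===== PORT B =====
-- VALID_PAIRS as a lookup: some = key present
def pvPairOf? (c : Char) : Option Char :=
  if c = '(' then some ')' else if c = '[' then some ']'
  else if c = '{' then some '}' else if c = '<' then some '>' else none
-- B's inner for-loop: push openers, pop-and-match closers, `none` = corrupted (break)
def pvScanB : List Char → List Char → Option (List Char)
  | [], stack => some stack
  | c :: rest, stack =>
    if (pvPairOf? c).isSome then pvScanB rest (c :: stack)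
    else match stack with
      | [] => none
      | o :: s => if (pvPairOf? o).getD ' ' ≠ c then none else pvScanB rest s
-- B's while-loop: fold the leftover stack top-first into the base-5 score
def pvScoreB : List Char → Int → Int
  | [], score => score
  | o :: rest, score => pvScoreB rest (score * 5 + pvCharScore ((pvPairOf? o).getD ' '))
def pvLineScoreB (line : List Char) : Option Int :=
  match pvScanB line [] with
  | none => none
  | some [] => none
  | some stack => some (pvScoreB stack 0)
def calculate_incomplete_syntax_scores_alt (lines : List String) : List Int :=
  lines.foldl (fun result line =>
    match pvLineScoreB line.toList with
    | some v => result ++ [v]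
    | none => result) []

-- ===== PRECONDITION & SPEC =====
def Spec_calculate_incomplete_syntax_scores (lines : List String) (out : List Int) : Prop := out = calculate_incomplete_syntax_scores_alt lines
instance (lines : List String) (out : List Int) : Decidable (Spec_calculate_incomplete_syntax_scores lines out) := by unfold Spec_calculate_incomplete_syntax_scores; infer_instance

-- ===== CLAIM (what is proved, stated in full; the proofs are below) =====
def Claim_equal_calculate_incomplete_syntax_scores : Prop := ∀ (lines : List String), Dom_calculate_incomplete_syntax_scores lines → Spec_calculate_incomplete_syntax_scores lines (calculate_incomplete_syntax_scores lines)

-- ===== LEMMAS AND PROOFS =====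

lemma pvOpen_eq (c : Char) : pvOpenCharA.contains c = (pvPairOf? c).isSome := by
  simp only [pvOpenCharA, pvPairOf?, List.contains_cons, List.contains_nil]
  split_ifs with h1 h2 h3 h4 <;> simp_all

lemma pvClose_eq (c : Char) : (pvPairOf? c).getD ' ' = pvPairClose c := by
  simp only [pvPairOf?, pvPairClose]
  split_ifs <;> rfl

lemma pvScan_rel : ∀ (chars stack : List Char),
    (pvScanB chars stack = none → pvIsIncompleteAux chars stack = false) ∧
    (∀ s, pvScanB chars stack = some s →
      pvIsIncompleteAux chars stack = !s.isEmpty ∧ pvBuildStack chars stack = s) := by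
  intro chars
  induction chars with
  | nil =>
    intro stack
    refine ⟨by simp [pvScanB], ?_⟩
    intro s hs
    simp only [pvScanB, Option.some.injEq] at hs
    subst hs
    constructor
    · simp [pvIsIncompleteAux]
      cases stack <;> simp
    · rfl
  | cons c rest ih =>
    intro stack
    by_cases hop : (pvPairOf? c).isSome
    · have hco : pvOpenCharA.contains c = true := by rw [pvOpen_eq]; exact hop
      constructor
      · intro hn
        simp only [pvScanB, hop, if_true] at hn
        simp only [pvIsIncompleteAux, hco, if_true]
        exact (ih (c :: stack)).1 hn
      · intro s hs
        simp only [pvScanB, hop, if_true] at hs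
        have := (ih (c :: stack)).2 s hs
        simp only [pvIsIncompleteAux, pvBuildStack, hco, if_true]
        exact this
    · have hco : pvOpenCharA.contains c = false := by rw [pvOpen_eq]; simpa using hop
      have hop' : (pvPairOf? c).isSome = false := by simpa using hop
      have hmem : c ∉ pvOpenCharA := by simpa using hco
      cases stack with
      | nil =>
        constructor
        · intro _; simp [pvIsIncompleteAux, hmem]
        · intro s hs; simp [pvScanB, hop'] at hs
      | cons o s0 =>
        by_cases hm : (pvPairOf? o).getD ' ' = c
        · have hmatch : c = pvPairClose o := by rw [← pvClose_eq]; exact hm.symm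
          have hsc : pvScanB (c :: rest) (o :: s0) = pvScanB rest s0 := by
            simp [pvScanB, hop', hm]
          have hai : pvIsIncompleteAux (c :: rest) (o :: s0) = pvIsIncompleteAux rest s0 := by
            simp [pvIsIncompleteAux, hmem, if_pos hmatch]
          have hbs : pvBuildStack (c :: rest) (o :: s0) = pvBuildStack rest s0 := by
            simp [pvBuildStack, hmem]
          rw [hsc, hai, hbs]
          exact ih s0
        · have hne : ¬ (c = pvPairClose o) := by
            rw [← pvClose_eq]; exact fun h => hm h.symm
          have hsc : pvScanB (c :: rest) (o :: s0) = none := by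
            simp [pvScanB, hop', hm]
          have hai : pvIsIncompleteAux (c :: rest) (o :: s0) = false := by
            simp [pvIsIncompleteAux, hmem, if_neg hne]
          exact ⟨fun _ => hai, fun s hs => by rw [hsc] at hs; cases hs⟩

lemma pvScore_eq : ∀ (st : List Char) (acc : Int),
    (st.map pvPairClose).foldl (fun r ch => r * 5 + pvCharScore ch) acc = pvScoreB st acc := by
  intro st
  induction st with
  | nil => intro acc; rfl
  | cons o rest ih =>
    intro acc
    simp only [List.map_cons, List.foldl_cons, pvScoreB, pvClose_eq]
    exact ih _

lemma pvLine_eq (line : List Char) (res : List Int) :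
    (if pvIsIncompleteAux line [] then
       res ++ [(pvCharsToComplete line).foldl (fun r ch => r * 5 + pvCharScore ch) 0]
     else res)
    = (match pvLineScoreB line with
       | some v => res ++ [v]
       | none => res) := by
  unfold pvLineScoreB
  cases hscan : pvScanB line [] with
  | none =>
    rw [(pvScan_rel line []).1 hscan]
    simp
  | some s =>
    obtain ⟨h1, h2⟩ := (pvScan_rel line []).2 s hscan
    cases s with
    | nil => simp [h1]
    | cons o s0 =>
      simp only [h1, List.isEmpty_cons, Bool.not_false, if_true]
      unfold pvCharsToComplete
      rw [h2, pvScore_eq]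

theorem pv_main (lines : List String) :
    calculate_incomplete_syntax_scores lines = calculate_incomplete_syntax_scores_alt lines := by
  unfold calculate_incomplete_syntax_scores calculate_incomplete_syntax_scores_alt
  suffices h : ∀ (ls : List String) (res : List Int),
      ls.foldl (fun result line =>
        if pvIsIncompleteAux line.toList [] then
          result ++ [(pvCharsToComplete line.toList).foldl (fun r ch => r * 5 + pvCharScore ch) 0]
        else result) res
      = ls.foldl (fun result line =>
          match pvLineScoreB line.toList with
          | some v => result ++ [v]
          | none => result) res by
    exact h lines []
  intro ls
  induction ls with
  | nil => intro res; rfl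
  | cons l rest ih =>
    intro res
    simp only [List.foldl_cons]
    rw [pvLine_eq l.toList res]
    exact ih _

-- ===== VERDICT (by name: the statement is the Claim_ definition above) =====
theorem calculate_incomplete_syntax_scores_spec : Claim_equal_calculate_incomplete_syntax_scores := by
  intro lines _
  unfold Spec_calculate_incomplete_syntax_scores
  exact pv_main lines
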